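-- pv_equiv track=rewrite | github.com/botsitopescao/pescaonevao | bot.py | get_team_leader
-- ===== SOURCE A (Python) =====
-- def get_team_leader(user_id: str, all_participants: dict):
--     # Si el usuario tiene team_members no vacíos, es líder
--     participant = all_participants.get(user_id)
--     if participant:
--         tm = participant.get("team_members", "")
--         if tm is None:
--             tm = ""
--         if tm.strip() != "":
--             return participant
--     # Si no, se busca si su user_id aparece en algún team_members de algún líder
--     for pid, part in all_participants.items():
--         if part is None:
--             continue
--         tm = part.get("team_members", "")
--         if tm is None:
--             tm = ""
--         tm = tm.strip()
--         if tm: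
--             members = [m.strip() for m in tm.split(",") if m.strip() != ""]
--             if user_id in members:
--                 return part
--     return None
-- ===== SOURCE B (Python) =====
-- def get_team_leader(user_id: str, all_participants: dict):
--     # One pass: index every parsed member id to its first leader; then answer by lookup.
--     leader_of = {}
--     for part in all_participants.values():
--         if part is None:
--             continue
--         tm = part.get("team_members", "")
--         if tm is None:
--             tm = ""
--         for m in (x.strip() for x in tm.strip().split(",")):
--             if m != "" and m not in leader_of:
--                 leader_of[m] = part
--     participant = all_participants.get(user_id)
--     if participant:
--         tm = participant.get("team_members", "")
--         if tm is None:
--             tm = ""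
--         if tm.strip() != "":
--             return participant
--     return leader_of.get(user_id)
-- ===== Notes on version B (the rewrite author's own statement) =====
-- stated objective: alternative
-- what changed: B replaces A's search loop that re-parses every leader's team_members and scans its member list per query with a single indexing pass building a first-wins dict from member id to leader, answered by one lookup after the self-leader check.
import Mathlib
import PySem

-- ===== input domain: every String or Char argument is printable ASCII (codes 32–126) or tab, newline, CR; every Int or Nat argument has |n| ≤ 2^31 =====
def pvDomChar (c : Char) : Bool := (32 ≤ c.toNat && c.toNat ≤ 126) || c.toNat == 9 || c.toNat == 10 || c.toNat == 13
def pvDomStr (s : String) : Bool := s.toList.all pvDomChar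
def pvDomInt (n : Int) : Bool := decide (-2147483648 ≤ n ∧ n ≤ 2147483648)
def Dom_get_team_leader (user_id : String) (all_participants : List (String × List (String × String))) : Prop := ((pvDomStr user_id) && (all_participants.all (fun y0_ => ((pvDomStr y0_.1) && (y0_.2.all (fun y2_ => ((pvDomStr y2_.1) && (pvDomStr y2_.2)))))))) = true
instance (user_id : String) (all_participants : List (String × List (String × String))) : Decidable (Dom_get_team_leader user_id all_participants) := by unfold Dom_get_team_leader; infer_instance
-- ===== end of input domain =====

-- B replaces A's per-leader rescanning loop by a single pass that indexes each member id
-- to its first leader in a dict, answering by one lookup (objective: alternative).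


-- ===== PORT A =====
-- part.get("team_members", "") ; the "tm is None" branch cannot fire (values are strings here)
def pvTm (part : List (String × String)) : String :=
  (PySem.Dict.mk part).getD "team_members" ""

-- [m.strip() for m in tm.split(",") if m.strip() != ""]  (tm already stripped by the caller)
def pvMembersA (tm : String) : List String :=
  (((PySem.Str.split? tm ",").getD []).map PySem.Str.strip).filter (fun m => m ≠ "")

-- the 'for pid, part in all_participants.items():' search loop of A
def pvLoopA (user_id : String) : List (String × List (String × String)) → Option (List (String × String))
  | [] => none
  | (_, part) :: rest =>
    let tm := PySem.Str.strip (pvTm part)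
    if tm ≠ "" then
      if user_id ∈ pvMembersA tm then some part else pvLoopA user_id rest
    else pvLoopA user_id rest

def get_team_leader (user_id : String) (all_participants : List (String × List (String × String))) : Option (List (String × String)) :=
  match (PySem.Dict.mk all_participants).get? user_id with
  | some participant =>
    if participant ≠ [] ∧ PySem.Str.strip (pvTm participant) ≠ "" then some participant
    else pvLoopA user_id all_participants
  | none => pvLoopA user_id all_participants

-- ===== PORT B =====
-- (x.strip() for x in tm.strip().split(","))
def pvPiecesB (part : List (String × String)) : List String :=
  ((PySem.Str.split? (PySem.Str.strip (pvTm part)) ",").getD []).map PySem.Str.strip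

-- inner loop: 'if m != "" and m not in leader_of: leader_of[m] = part'
def pvIndexMembers (d : PySem.Dict String (List (String × String))) (part : List (String × String)) : PySem.Dict String (List (String × String)) :=
  (pvPiecesB part).foldl (fun d m => if m ≠ "" ∧ ¬ d.contains m then d.insert m part else d) d

def get_team_leader_alt (user_id : String) (all_participants : List (String × List (String × String))) : Option (List (String × String)) :=
  let leader_of := all_participants.foldl (fun d p => pvIndexMembers d p.2) PySem.Dict.empty
  match (PySem.Dict.mk all_participants).get? user_id with
  | some participant =>
    if participant ≠ [] ∧ PySem.Str.strip (pvTm participant) ≠ "" then some participant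
    else leader_of.get? user_id
  | none => leader_of.get? user_id

-- ===== PRECONDITION & SPEC =====
-- Pre_ excludes association lists with duplicate keys: a Python dict cannot contain them, and on such
-- lists the first-match assoc-list reading is not the behaviour of the dict that reaches A.
def Pre_get_team_leader (user_id : String) (all_participants : List (String × List (String × String))) : Prop :=
  (all_participants.map Prod.fst).Nodup
instance (user_id : String) (all_participants : List (String × List (String × String))) : Decidable (Pre_get_team_leader user_id all_participants) := by unfold Pre_get_team_leader; infer_instance

def pvWitness_get_team_leader : String × (List (String × List (String × String))) :=
  ("u1", [("lead", [("team_members", "u1, u2")]), ("u1", [("team_members", "")])])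

def Spec_get_team_leader (user_id : String) (all_participants : List (String × List (String × String))) (out : Option (List (String × String))) : Prop := out = get_team_leader_alt user_id all_participants
instance (user_id : String) (all_participants : List (String × List (String × String))) (out : Option (List (String × String))) : Decidable (Spec_get_team_leader user_id all_participants out) := by unfold Spec_get_team_leader; infer_instance

-- ===== CLAIM (what is proved, stated in full; the proofs are below) =====
def Claim_equal_get_team_leader : Prop := ∀ (user_id : String) (all_participants : List (String × List (String × String))), Dom_get_team_leader user_id all_participants → Pre_get_team_leader user_id all_participants → Spec_get_team_leader user_id all_participants (get_team_leader user_id all_participants)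

-- ===== LEMMAS AND PROOFS =====

-- lookup after B's inner indexing fold = old binding if any, else first-parsed-member hit
theorem pv_get_index_fold (uid : String) (part : List (String × String)) :
    ∀ (ms : List String) (d : PySem.Dict String (List (String × String))),
      ((ms.foldl (fun d m => if m ≠ "" ∧ ¬ d.contains m then d.insert m part else d) d)).get? uid
        = match d.get? uid with
          | some v => some v
          | none => if uid ∈ ms.filter (fun m => m ≠ "") then some part else none := by
  intro ms
  induction ms with
  | nil => intro d; cases h : d.get? uid <;> simp [h]
  | cons m ms ih =>
    intro d
    simp only [List.foldl_cons]
    by_cases hm : m ≠ "" ∧ ¬ d.contains m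
    · rw [if_pos hm, ih]
      rw [PySem.Dict.get?_insert]
      by_cases he : uid = m
      · subst he
        have hd : d.get? uid = none := (PySem.Dict.get?_eq_none_iff_contains d uid).mpr
          (by simpa using hm.2)
        simp [hd, hm.1]
      · simp only [if_neg he]
        cases h : d.get? uid
        · simp [List.filter_cons]
          by_cases h1 : m = "" <;> simp [h1, he]
        · simp
    · rw [if_neg hm, ih]
      cases h : d.get? uid
      · simp only []
        by_cases h1 : m = ""
        · simp [List.filter_cons, h1]
        · -- then d.contains m = true, so uid ≠ m (else d.get? uid ≠ none)
          have hc : d.contains m := by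
            by_contra hc; exact hm ⟨h1, hc⟩
          have he : uid ≠ m := by
            intro he; subst he
            rw [(PySem.Dict.get?_eq_none_iff_contains d uid).mp h] at hc; exact absurd hc (by simp)
          simp [h1, he]
      · simp

-- A's loop on a cons: one hit test, then the rest (the empty-tm guard folds into the member test)
theorem pvLoopA_cons (uid pid : String) (part : List (String × String)) (rest : List (String × List (String × String))) :
    pvLoopA uid ((pid, part) :: rest)
      = if uid ∈ pvMembersA (PySem.Str.strip (pvTm part)) then some part else pvLoopA uid rest := by
  by_cases hs : PySem.Str.strip (pvTm part) = ""
  · have hmem : pvMembersA "" = ([] : List String) := rfl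
    simp [pvLoopA, hs, hmem]
  · simp [pvLoopA, hs]

-- lookup in B's leader_of dict = A's search loop
theorem pv_get_build (uid : String) :
    ∀ (aps : List (String × List (String × String))) (d : PySem.Dict String (List (String × String))),
      ((aps.foldl (fun d p => pvIndexMembers d p.2) d)).get? uid
        = match d.get? uid with
          | some v => some v
          | none => pvLoopA uid aps := by
  intro aps
  induction aps with
  | nil => intro d; cases h : d.get? uid <;> simp [pvLoopA, h]
  | cons p rest ih =>
    intro d
    obtain ⟨pid, part⟩ := p
    simp only [List.foldl_cons]
    rw [ih]
    unfold pvIndexMembers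
    rw [pv_get_index_fold]
    cases h : d.get? uid
    · simp only []
      have hfil : (pvPiecesB part).filter (fun m => m ≠ "") = pvMembersA (PySem.Str.strip (pvTm part)) := rfl
      rw [hfil, pvLoopA_cons]
      by_cases hu : uid ∈ pvMembersA (PySem.Str.strip (pvTm part)) <;> simp [hu]
    · simp

-- ===== VERDICT (by name: the statement is the Claim_ definition above) =====
theorem get_team_leader_spec : Claim_equal_get_team_leader := by
  intro user_id aps _ _
  unfold Spec_get_team_leader get_team_leader get_team_leader_alt
  have h := pv_get_build user_id aps PySem.Dict.empty
  rw [PySem.Dict.get?_empty] at h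
  cases hg : (PySem.Dict.mk aps).get? user_id <;> simp only
  · rw [h]
  · split_ifs <;> [rfl; rw [h]]
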